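-- pv_equiv track=rewrite | github.com/johnjezl/CS-480-Signature-Assignment | tools/generate_test_images.py | create_expected_facelets
-- ===== SOURCE A (Python) =====
-- COLORS = {
--     'W': (255, 255, 255),  # White
--     'Y': (255, 255, 0),    # Yellow
--     'R': (255, 0, 0),      # Red
--     'O': (255, 165, 0),    # Orange
--     'B': (0, 0, 255),      # Blue
--     'G': (0, 255, 0),      # Green
-- }
--
-- def create_expected_facelets(pattern: list, size: int = 64) -> list:
--     """
--     Create the expected 64x64 facelet images for a pattern.
--
--     Args:
--         pattern: List of 9 color codes
--         size: Output size for each facelet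
--
--     Returns:
--         List of 9 pixel lists, each for a size x size image
--     """
--     facelets = []
--
--     for color_code in pattern:
--         color = COLORS[color_code]
--         # Solid color square with thin border
--         pixels = []
--         border = 2
--         for y in range(size):
--             for x in range(size):
--                 if x < border or x >= size - border or y < border or y >= size - border:
--                     pixels.append((0, 0, 0))  # Black border
--                 else:
--                     pixels.append(color)
--         facelets.append(pixels)
--
--     return facelets
-- ===== SOURCE B (Python) =====
-- COLORS = {
--     'W': (255, 255, 255),  # White
--     'Y': (255, 255, 0),    # Yellow
--     'R': (255, 0, 0),      # Red
--     'O': (255, 165, 0),    # Orange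
--     'B': (0, 0, 255),      # Blue
--     'G': (0, 255, 0),      # Green
-- }
--
-- def _facelet(color, size, border=2):
--     black = (0, 0, 0)
--     black_row = [black] * size
--     interior_row = [black] * border + [color] * (size - 2 * border) + [black] * border
--     pixels = []
--     for y in range(size):
--         pixels.extend(black_row if y < border or y >= size - border else interior_row)
--     return pixels
--
-- def create_expected_facelets(pattern: list, size: int = 64) -> list:
--     return [_facelet(COLORS[c], size) for c in pattern]
-- ===== Notes on version B (the rewrite author's own statement) =====
-- stated objective: faster
-- what changed: Per-pixel nested x/y loop testing the 4-way border condition on every pixel is replaced by precomputed row templates (an all-black row and an interior row), selected once per row, removing the inner x loop.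
import Mathlib
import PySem

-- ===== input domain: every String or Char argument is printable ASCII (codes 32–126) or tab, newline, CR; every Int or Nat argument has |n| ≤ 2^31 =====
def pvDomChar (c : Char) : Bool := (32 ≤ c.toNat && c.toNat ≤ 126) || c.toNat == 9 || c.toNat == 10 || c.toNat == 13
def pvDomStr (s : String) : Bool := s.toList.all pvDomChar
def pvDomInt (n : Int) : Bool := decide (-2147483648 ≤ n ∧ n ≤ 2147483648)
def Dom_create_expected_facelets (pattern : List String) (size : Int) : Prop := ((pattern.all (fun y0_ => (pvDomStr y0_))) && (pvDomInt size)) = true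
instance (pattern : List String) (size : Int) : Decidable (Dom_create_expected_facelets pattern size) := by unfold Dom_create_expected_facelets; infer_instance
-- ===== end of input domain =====

-- B replaces A's per-pixel nested loop (4-way border test on every pixel) by precomputed
-- row templates (black row / interior row) chosen once per row; return values agree on Pre_.

-- ===== PORT A =====
def pvCOLORS : PySem.Dict String (Int × Int × Int) :=
  PySem.Dict.ofList [("W", (255, 255, 255)), ("Y", (255, 255, 0)), ("R", (255, 0, 0)),
                     ("O", (255, 165, 0)), ("B", (0, 0, 255)), ("G", (0, 255, 0))]

def create_expected_facelets (pattern : List String) (size : Int) : List (List (Int × Int × Int)) :=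
  pattern.foldl (fun facelets color_code =>
    -- COLORS[color_code]: KeyError (get? = none) is excluded by Pre_; the default is never read there
    let color := (PySem.Dict.get? pvCOLORS color_code).getD (0, 0, 0)
    let border : Int := 2
    let pixels := (PySem.List.pyRange 0 size 1).foldl (fun px y =>
      (PySem.List.pyRange 0 size 1).foldl (fun px x =>
        if x < border ∨ x ≥ size - border ∨ y < border ∨ y ≥ size - border then
          px ++ [((0 : Int), (0 : Int), (0 : Int))]
        else
          px ++ [color]) px) []
    facelets ++ [pixels]) []

-- ===== PORT B =====
def pvFacelet (color : Int × Int × Int) (size : Int) (border : Int) : List (Int × Int × Int) :=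
  let black : Int × Int × Int := (0, 0, 0)
  let black_row := List.replicate size.toNat black
  let interior_row := List.replicate border.toNat black
      ++ List.replicate (size - 2 * border).toNat color ++ List.replicate border.toNat black
  (PySem.List.pyRange 0 size 1).foldl (fun px y =>
    px ++ (if y < border ∨ y ≥ size - border then black_row else interior_row)) []

def create_expected_facelets_alt (pattern : List String) (size : Int) : List (List (Int × Int × Int)) :=
  pattern.map (fun c => pvFacelet ((PySem.Dict.get? pvCOLORS c).getD (0, 0, 0)) size 2)

-- ===== PRECONDITION & SPEC =====
-- Pre_ excludes exactly the inputs on which the Python A raises KeyError: a pattern entry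
-- that is not one of the six color keys.
def Pre_create_expected_facelets (pattern : List String) (size : Int) : Prop :=
  ∀ c ∈ pattern, c ∈ ["W", "Y", "R", "O", "B", "G"]
instance (pattern : List String) (size : Int) : Decidable (Pre_create_expected_facelets pattern size) := by unfold Pre_create_expected_facelets; infer_instance

def pvWitness_create_expected_facelets : List String × Int := (["W", "R", "G"], 6)

def Spec_create_expected_facelets (pattern : List String) (size : Int) (out : List (List (Int × Int × Int))) : Prop := out = create_expected_facelets_alt pattern size
instance (pattern : List String) (size : Int) (out : List (List (Int × Int × Int))) : Decidable (Spec_create_expected_facelets pattern size out) := by unfold Spec_create_expected_facelets; infer_instance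

-- ===== CLAIM (what is proved, stated in full; the proofs are below) =====
def Claim_equal_create_expected_facelets : Prop := ∀ (pattern : List String) (size : Int), Dom_create_expected_facelets pattern size → Pre_create_expected_facelets pattern size → Spec_create_expected_facelets pattern size (create_expected_facelets pattern size)

-- ===== LEMMAS AND PROOFS =====

-- A's inner x-loop for one row y equals the row template B selects for that y.
theorem pvRow_eq (size y : Int) (color : Int × Int × Int) (px0 : List (Int × Int × Int)) :
    (PySem.List.pyRange 0 size 1).foldl (fun px x =>
      if x < 2 ∨ x ≥ size - 2 ∨ y < 2 ∨ y ≥ size - 2 then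
        px ++ [((0 : Int), (0 : Int), (0 : Int))]
      else
        px ++ [color]) px0
    = px0 ++ (if y < 2 ∨ y ≥ size - 2 then
        List.replicate size.toNat ((0 : Int), (0 : Int), (0 : Int))
      else
        List.replicate 2 ((0 : Int), (0 : Int), (0 : Int))
          ++ List.replicate (size - 2 * 2).toNat color
          ++ List.replicate 2 ((0 : Int), (0 : Int), (0 : Int))) := by
  have hbody : (PySem.List.pyRange 0 size 1).foldl (fun px x =>
      if x < 2 ∨ x ≥ size - 2 ∨ y < 2 ∨ y ≥ size - 2 then
        px ++ [((0 : Int), (0 : Int), (0 : Int))]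
      else
        px ++ [color]) px0
    = px0 ++ (PySem.List.pyRange 0 size 1).map (fun x =>
        if x < 2 ∨ x ≥ size - 2 ∨ y < 2 ∨ y ≥ size - 2 then ((0 : Int), (0 : Int), (0 : Int)) else color) := by
    exact (PySem.List.foldl_congr_mem
      (l := PySem.List.pyRange 0 size 1) (init := px0)
      (f := fun px x => if x < 2 ∨ x ≥ size - 2 ∨ y < 2 ∨ y ≥ size - 2 then
        px ++ [((0 : Int), (0 : Int), (0 : Int))] else px ++ [color])
      (g := fun px x => px ++ [if x < 2 ∨ x ≥ size - 2 ∨ y < 2 ∨ y ≥ size - 2 then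
        ((0 : Int), (0 : Int), (0 : Int)) else color])
      (fun acc x _ => by dsimp only; split <;> rfl)).trans
      (PySem.List.foldl_append_singleton_eq_map _ _ _)
  rw [hbody]
  congr 1
  by_cases hb : y < 2 ∨ y ≥ size - 2
  · rw [if_pos hb]
    rw [List.map_congr_left (g := fun _ => ((0 : Int), (0 : Int), (0 : Int)))
          (fun x _ => if_pos (Or.inr (Or.inr hb)))]
    rw [List.map_const', PySem.List.length_pyRange_one]
    norm_num
  · rw [if_neg hb]
    push Not at hb
    obtain ⟨h2y, hys⟩ := hb
    have hcong : ∀ x ∈ PySem.List.pyRange 0 size 1,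
        (if x < 2 ∨ x ≥ size - 2 ∨ y < 2 ∨ y ≥ size - 2 then ((0 : Int), (0 : Int), (0 : Int)) else color)
        = (if x < 2 ∨ x ≥ size - 2 then ((0 : Int), (0 : Int), (0 : Int)) else color) := by
      intro x _
      by_cases hx : x < 2 ∨ x ≥ size - 2
      · rcases hx with h | h
        · rw [if_pos (Or.inl h), if_pos (Or.inl h)]
        · rw [if_pos (Or.inr (Or.inl h)), if_pos (Or.inr h)]
      · push Not at hx
        rw [if_neg (by omega), if_neg (by omega)]
    rw [List.map_congr_left hcong,
        PySem.List.pyRange_one_append 0 2 size (by omega) (by omega),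
        PySem.List.pyRange_one_append 2 (size - 2) size (by omega) (by omega),
        List.map_append, List.map_append]
    have e1 : (PySem.List.pyRange 0 2 1).map
        (fun x => if x < 2 ∨ x ≥ size - 2 then ((0 : Int), (0 : Int), (0 : Int)) else color)
        = List.replicate 2 ((0 : Int), (0 : Int), (0 : Int)) := by
      rw [List.map_congr_left (g := fun _ => ((0 : Int), (0 : Int), (0 : Int)))
            (fun x hx => if_pos (Or.inl (PySem.List.mem_pyRange_one.mp hx).2))]
      rw [List.map_const', PySem.List.length_pyRange_one]
      congr 1
    have e2 : (PySem.List.pyRange 2 (size - 2) 1).map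
        (fun x => if x < 2 ∨ x ≥ size - 2 then ((0 : Int), (0 : Int), (0 : Int)) else color)
        = List.replicate (size - 2 * 2).toNat color := by
      rw [List.map_congr_left (g := fun _ => color)
            (fun x hx => by
              obtain ⟨hx1, hx2⟩ := PySem.List.mem_pyRange_one.mp hx
              exact if_neg (by omega))]
      rw [List.map_const', PySem.List.length_pyRange_one]
      congr 1
      omega
    have e3 : (PySem.List.pyRange (size - 2) size 1).map
        (fun x => if x < 2 ∨ x ≥ size - 2 then ((0 : Int), (0 : Int), (0 : Int)) else color)
        = List.replicate 2 ((0 : Int), (0 : Int), (0 : Int)) := by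
      rw [List.map_congr_left (g := fun _ => ((0 : Int), (0 : Int), (0 : Int)))
            (fun x hx => if_pos (Or.inr (PySem.List.mem_pyRange_one.mp hx).1))]
      rw [List.map_const', PySem.List.length_pyRange_one]
      congr 1
      omega
    rw [e1, e2, e3, List.append_assoc]

theorem pvFacelet_eq (size : Int) (color : Int × Int × Int) :
    (PySem.List.pyRange 0 size 1).foldl (fun px y =>
      (PySem.List.pyRange 0 size 1).foldl (fun px x =>
        if x < 2 ∨ x ≥ size - 2 ∨ y < 2 ∨ y ≥ size - 2 then
          px ++ [((0 : Int), (0 : Int), (0 : Int))]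
        else
          px ++ [color]) px) []
    = pvFacelet color size 2 := by
  unfold pvFacelet
  apply PySem.List.foldl_congr_mem
  intro px y _
  exact pvRow_eq size y color px

-- ===== VERDICT (by name: the statement is the Claim_ definition above) =====
theorem create_expected_facelets_spec : Claim_equal_create_expected_facelets := by
  intro pattern size _ _
  unfold Spec_create_expected_facelets create_expected_facelets create_expected_facelets_alt
  rw [PySem.List.foldl_append_singleton_eq_map (f := fun color_code =>
    (PySem.List.pyRange 0 size 1).foldl (fun px y =>
      (PySem.List.pyRange 0 size 1).foldl (fun px x =>
        if x < 2 ∨ x ≥ size - 2 ∨ y < 2 ∨ y ≥ size - 2 then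
          px ++ [((0 : Int), (0 : Int), (0 : Int))]
        else
          px ++ [(PySem.Dict.get? pvCOLORS color_code).getD (0, 0, 0)]) px) [])]
  simp only [List.nil_append]
  exact List.map_congr_left (fun c _ => pvFacelet_eq size _)
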